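-- pv_equiv track=rewrite | github.com/SamDeiter/context-monitor | migrate_phase5_step1.py | replace_method_body
-- ===== SOURCE A (Python) =====
-- def replace_method_body(content, method_name, new_body, signature_end="):"):
--     """Replace a method's body with a thin wrapper"""
--     lines = content.split('\n')
--     result = []
--     in_target_method = False
--     method_indent = 0
--     skip_lines = False
--
--     i = 0
--     while i < len(lines):
--         line = lines[i]
--
--         if f'def {method_name}(self' in line and signature_end in line and not in_target_method:
--             in_target_method = True
--             method_indent = len(line) - len(line.lstrip())
--             result.append(f'{" " * method_indent}def {method_name}(self, event):')
--             result.append(f'{" " * method_indent}    """Delegated to menu_builder (Phase 5: V2.48)"""')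
--             result.append(f'{" " * method_indent}    {new_body}')
--             skip_lines = True
--             i += 1
--             continue
--
--         if skip_lines:
--             stripped = line.strip()
--             if stripped and not stripped.startswith('#') and not stripped.startswith('"""') and not stripped.startswith("'''"):
--                 current_indent = len(line) - len(line.lstrip())
--                 if current_indent <= method_indent and (stripped.startswith('def ') or stripped.startswith('class ')):
--                     skip_lines = False
--                     in_target_method = False
--                     result.append(line)
--             i += 1
--             continue
--
--         result.append(line)
--         i += 1
--
--     return '\n'.join(result)
-- ===== SOURCE B (Python) =====
-- def replace_method_body(content, method_name, new_body, signature_end="):"):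
--     """Two-pass: tokenize lines into copy/replace tokens, then render the tokens."""
--     lines = content.split('\n')
--     needle = f'def {method_name}(self'
--
--     def indent_of(line):
--         return len(line) - len(line.lstrip())
--
--     def is_terminator(line, method_indent):
--         stripped = line.strip()
--         return (bool(stripped)
--                 and not stripped.startswith('#')
--                 and not stripped.startswith('"""')
--                 and not stripped.startswith("'''")
--                 and indent_of(line) <= method_indent
--                 and (stripped.startswith('def ') or stripped.startswith('class ')))
--
--     # pass 1: tokenize
--     tokens = []  # ('copy', line) | ('repl', indent, terminator_line_or_None)
--     i, n = 0, len(lines)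
--     while i < n:
--         line = lines[i]
--         if needle in line and signature_end in line:
--             indent = indent_of(line)
--             j = i + 1
--             while j < n and not is_terminator(lines[j], indent):
--                 j += 1
--             tokens.append(('repl', indent, lines[j] if j < n else None))
--             i = j + 1
--         else:
--             tokens.append(('copy', line))
--             i += 1
--
--     # pass 2: render
--     out = []
--     for tok in tokens:
--         if tok[0] == 'copy':
--             out.append(tok[1])
--         else:
--             _, indent, term = tok
--             pad = ' ' * indent
--             out.append(f'{pad}def {method_name}(self, event):')
--             out.append(f'{pad}    """Delegated to menu_builder (Phase 5: V2.48)"""')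
--             out.append(f'{pad}    {new_body}')
--             if term is not None:
--                 out.append(term)
--     return '\n'.join(out)
-- ===== Notes on version B (the rewrite author's own statement) =====
-- stated objective: alternative
-- what changed: A's single flag-driven state-machine pass (in_target_method/skip_lines booleans mutated while appending) is replaced by a two-pass decomposition: first tokenize the lines into copy/replace tokens (each replace token found by an inner forward scan for the kept terminator line), then render the token list into output lines.
import Mathlib
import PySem

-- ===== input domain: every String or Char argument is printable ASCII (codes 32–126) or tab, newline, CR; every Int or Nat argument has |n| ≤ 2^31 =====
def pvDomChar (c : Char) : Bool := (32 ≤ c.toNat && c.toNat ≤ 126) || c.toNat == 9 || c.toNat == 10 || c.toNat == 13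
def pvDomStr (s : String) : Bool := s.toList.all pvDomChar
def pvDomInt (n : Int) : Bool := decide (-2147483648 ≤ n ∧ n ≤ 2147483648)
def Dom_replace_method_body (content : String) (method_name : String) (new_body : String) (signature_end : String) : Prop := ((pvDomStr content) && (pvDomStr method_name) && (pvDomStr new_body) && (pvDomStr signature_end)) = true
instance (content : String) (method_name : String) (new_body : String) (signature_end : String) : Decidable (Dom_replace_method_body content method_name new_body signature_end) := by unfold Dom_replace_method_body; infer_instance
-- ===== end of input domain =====

-- B replaces A's one-pass flag-machine by a two-pass decomposition (tokenize into copy/replace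
-- tokens with an inner terminator scan, then render the tokens); objective: alternative structure, same cost.

-- ===== PORT A =====
-- A's single loop over the lines, carrying (result, in_target_method, method_indent, skip_lines).
def pvA_loop (mn nb se : String) : List String → List String → Bool → Int → Bool → List String
  | [], result, _, _, _ => result
  | line :: rest, result, inT, mInd, skip =>
    if PySem.Str.isIn ("def " ++ mn ++ "(self") line && PySem.Str.isIn se line && !inT then
      let ind : Int := PySem.Str.len line - PySem.Str.len (PySem.Str.lstrip line)
      let pad : String := String.ofList (List.replicate ind.toNat ' ')   -- " " * method_indent (indent ≥ 0, so toNat is exact)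
      pvA_loop mn nb se rest
        (result ++ [pad ++ "def " ++ mn ++ "(self, event):",
                    pad ++ "    \"\"\"Delegated to menu_builder (Phase 5: V2.48)\"\"\"",
                    pad ++ "    " ++ nb]) true ind true
    else if skip then
      let stripped := PySem.Str.strip line
      if stripped != "" && !(PySem.Str.startswith stripped "#")
          && !(PySem.Str.startswith stripped "\"\"\"") && !(PySem.Str.startswith stripped "'''") then
        let cur : Int := PySem.Str.len line - PySem.Str.len (PySem.Str.lstrip line)
        if decide (cur ≤ mInd) && (PySem.Str.startswith stripped "def " || PySem.Str.startswith stripped "class ") then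
          pvA_loop mn nb se rest (result ++ [line]) false mInd false
        else
          pvA_loop mn nb se rest result inT mInd skip
      else
        pvA_loop mn nb se rest result inT mInd skip
    else
      pvA_loop mn nb se rest (result ++ [line]) inT mInd skip

def replace_method_body (content : String) (method_name : String) (new_body : String) (signature_end : String) : String :=
  PySem.Str.join "\n" (pvA_loop method_name new_body signature_end (((PySem.Str.split? content "\n").getD [])) [] false 0 false)

-- ===== PORT B =====
inductive PvTok : Type
  | copy : String → PvTok
  | repl : Int → Option String → PvTok
deriving DecidableEq, Repr

def pvB_indentOf (line : String) : Int :=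
  PySem.Str.len line - PySem.Str.len (PySem.Str.lstrip line)

def pvB_isTerm (line : String) (mInd : Int) : Bool :=
  let stripped := PySem.Str.strip line
  stripped != "" && !(PySem.Str.startswith stripped "#")
    && !(PySem.Str.startswith stripped "\"\"\"") && !(PySem.Str.startswith stripped "'''")
    && decide (pvB_indentOf line ≤ mInd)
    && (PySem.Str.startswith stripped "def " || PySem.Str.startswith stripped "class ")

-- B's inner scan: skip to the first terminator line, returning it (if any) and the lines after it.
def pvB_consume (mInd : Int) : List String → Option String × List String
  | [] => (none, [])
  | l :: rest => if pvB_isTerm l mInd then (some l, rest) else pvB_consume mInd rest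

theorem pvB_consume_length (mInd : Int) (xs : List String) :
    (pvB_consume mInd xs).2.length ≤ xs.length := by
  induction xs with
  | nil => simp [pvB_consume]
  | cons l rest ih =>
    simp only [pvB_consume]
    split
    · simp
    · exact Nat.le_succ_of_le ih

-- B pass 1: tokenize the lines.
def pvB_tokenize (mn se : String) : List String → List PvTok
  | [] => []
  | line :: rest =>
    if PySem.Str.isIn ("def " ++ mn ++ "(self") line && PySem.Str.isIn se line then
      let ind := pvB_indentOf line
      PvTok.repl ind (pvB_consume ind rest).1 :: pvB_tokenize mn se (pvB_consume ind rest).2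
    else
      PvTok.copy line :: pvB_tokenize mn se rest
termination_by xs => xs.length
decreasing_by
  · exact Nat.lt_succ_of_le (pvB_consume_length _ _)
  · simp

-- B pass 2: render the tokens.
def pvB_render (mn nb : String) : List PvTok → List String
  | [] => []
  | PvTok.copy l :: rest => l :: pvB_render mn nb rest
  | PvTok.repl ind t :: rest =>
    let pad : String := String.ofList (List.replicate ind.toNat ' ')
    (pad ++ "def " ++ mn ++ "(self, event):") ::
    (pad ++ "    \"\"\"Delegated to menu_builder (Phase 5: V2.48)\"\"\"") ::
    (pad ++ "    " ++ nb) ::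
    (match t with
     | some l => l :: pvB_render mn nb rest
     | none => pvB_render mn nb rest)

def replace_method_body_alt (content : String) (method_name : String) (new_body : String) (signature_end : String) : String :=
  PySem.Str.join "\n"
    (pvB_render method_name new_body
      (pvB_tokenize method_name signature_end (((PySem.Str.split? content "\n").getD []))))

-- ===== PRECONDITION & SPEC =====
def Spec_replace_method_body (content : String) (method_name : String) (new_body : String) (signature_end : String) (out : String) : Prop := out = replace_method_body_alt content method_name new_body signature_end
instance (content : String) (method_name : String) (new_body : String) (signature_end : String) (out : String) : Decidable (Spec_replace_method_body content method_name new_body signature_end out) := by unfold Spec_replace_method_body; infer_instance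

-- ===== CLAIM (what is proved, stated in full; the proofs are below) =====
def Claim_equal_replace_method_body : Prop := ∀ (content : String) (method_name : String) (new_body : String) (signature_end : String), Dom_replace_method_body content method_name new_body signature_end → Spec_replace_method_body content method_name new_body signature_end (replace_method_body content method_name new_body signature_end)

-- ===== LEMMAS AND PROOFS =====

-- pvB_isTerm regrouped as A's two nested if-conditions.
theorem pvB_isTerm_eq (line : String) (mInd : Int) :
    pvB_isTerm line mInd =
      ((PySem.Str.strip line != "" && !(PySem.Str.startswith (PySem.Str.strip line) "#")
          && !(PySem.Str.startswith (PySem.Str.strip line) "\"\"\"")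
          && !(PySem.Str.startswith (PySem.Str.strip line) "'''"))
        && (decide (PySem.Str.len line - PySem.Str.len (PySem.Str.lstrip line) ≤ mInd)
          && (PySem.Str.startswith (PySem.Str.strip line) "def "
              || PySem.Str.startswith (PySem.Str.strip line) "class "))) := by
  simp [pvB_isTerm, pvB_indentOf, Bool.and_assoc]

-- A's skip mode from (inT, skip) = (true, true) is exactly B's pvB_consume.
theorem pvA_loop_skip (mn nb se : String) (xs : List String) :
    ∀ (result : List String) (mInd : Int),
      pvA_loop mn nb se xs result true mInd true =
        pvA_loop mn nb se (pvB_consume mInd xs).2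
          (result ++ (pvB_consume mInd xs).1.toList) false mInd false := by
  induction xs with
  | nil => intro result mInd; simp [pvA_loop, pvB_consume]
  | cons line rest ih =>
    intro result mInd
    simp only [pvA_loop, pvB_consume, Bool.not_true, Bool.and_false, Bool.false_eq_true,
      if_false, pvB_isTerm_eq]
    cases hc1 : (PySem.Str.strip line != "" && !(PySem.Str.startswith (PySem.Str.strip line) "#")
        && !(PySem.Str.startswith (PySem.Str.strip line) "\"\"\"")
        && !(PySem.Str.startswith (PySem.Str.strip line) "'''")) with
    | false =>
      simp only [Bool.false_and, Bool.false_eq_true, if_false]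
      exact ih result mInd
    | true =>
      cases hc2 : (decide (PySem.Str.len line - PySem.Str.len (PySem.Str.lstrip line) ≤ mInd)
          && (PySem.Str.startswith (PySem.Str.strip line) "def "
              || PySem.Str.startswith (PySem.Str.strip line) "class ")) with
      | false =>
        simp only [Bool.true_and, Bool.false_eq_true, if_false, if_true]
        exact ih result mInd
      | true => simp

-- A's normal mode from (inT, skip) = (false, false) is B's tokenize-then-render.
theorem pvA_loop_main (mn nb se : String) :
    ∀ (n : Nat) (xs : List String), xs.length ≤ n → ∀ (result : List String) (mInd : Int),
      pvA_loop mn nb se xs result false mInd false =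
        result ++ pvB_render mn nb (pvB_tokenize mn se xs) := by
  intro n
  induction n with
  | zero =>
    intro xs hlen result mInd
    have : xs = [] := List.eq_nil_of_length_eq_zero (Nat.le_zero.mp hlen)
    subst this
    simp [pvA_loop, pvB_tokenize, pvB_render]
  | succ n ih =>
    intro xs hlen result mInd
    cases xs with
    | nil => simp [pvA_loop, pvB_tokenize, pvB_render]
    | cons line rest =>
      have hrest : rest.length ≤ n := Nat.le_of_succ_le_succ hlen
      rw [pvB_tokenize]
      cases hm : (PySem.Str.isIn ("def " ++ mn ++ "(self") line && PySem.Str.isIn se line) with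
      | true =>
        have hrest' : (pvB_consume (PySem.Str.len line - PySem.Str.len (PySem.Str.lstrip line)) rest).2.length ≤ n :=
          le_trans (pvB_consume_length _ _) hrest
        simp only [pvA_loop, hm, Bool.not_false, Bool.and_true, if_true]
        rw [pvA_loop_skip]
        simp only [pvB_indentOf]
        rw [ih _ hrest']
        cases ht : (pvB_consume (PySem.Str.len line - PySem.Str.len (PySem.Str.lstrip line)) rest).1 with
        | none => simp [pvB_render]
        | some l => simp [pvB_render]
      | false =>
        simp only [pvA_loop, hm, Bool.not_false, Bool.and_true, Bool.false_eq_true, if_false]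
        rw [ih _ hrest]
        simp [pvB_render]

-- ===== VERDICT (by name: the statement is the Claim_ definition above) =====
theorem replace_method_body_spec : Claim_equal_replace_method_body := by
  intro content mn nb se _hDom
  unfold Spec_replace_method_body replace_method_body replace_method_body_alt
  rw [pvA_loop_main mn nb se (((PySem.Str.split? content "\n").getD [])).length _ le_rfl]
  simp
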